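-- pv_equiv track=rewrite | github.com/DFlexy/dfindexer | utils/parsing/link_resolver.py | _unshuffle_string
-- ===== SOURCE A (Python) =====
-- from typing import Optional, List
--
-- def _unshuffle_string(shuffled: str) -> Optional[str]:
--     # Replica a função unshuffleString do JavaScript do Starck Filmes (step=3)
--     try:
--         length = len(shuffled)
--         original = [''] * length
--         used = [False] * length
--         step = 3
--         index = 0
--
--         for i in range(length):
--             while used[index]:
--                 index = (index + 1) % length
--             used[index] = True
--             original[i] = shuffled[index]
--             index = (index + step) % length
--
--         return ''.join(original)
--     except Exception:
--         return None
-- ===== SOURCE B (Python) =====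
-- from typing import Optional
--
-- def _unshuffle_string(shuffled: str) -> Optional[str]:
--     # Pass-based sweep: instead of probing for the next unused slot per pick,
--     # repeatedly sweep the sorted list of still-free positions once, picking
--     # every position reached by the step-3 threshold during that sweep and
--     # carrying the skipped ones (a shrinking list) into the next sweep.
--     # Between two picks at most two positions are skipped, so each sweep
--     # retires at least a third of the remaining positions: O(n log n) total.
--     n = len(shuffled)
--     out = []
--     free = list(range(n))
--     t = 0
--     while free:
--         if free[-1] < t:
--             t = 0          # nothing at or after t is free: wrap the circle
--         rest = []
--         i = 0
--         while i < len(free):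
--             x = free[i]
--             if x >= t:
--                 out.append(shuffled[x])
--                 t = x + 3
--                 if t >= n:             # stepped past the end: wrap, restart sweep
--                     t %= n
--                     rest.extend(free[i + 1:])
--                     break
--             else:
--                 rest.append(x)
--             i += 1
--         free = rest
--     return ''.join(out)
-- ===== Notes on version B (the rewrite author's own statement) =====
-- stated objective: alternative
-- what changed: Replaces A's per-pick circular probe over a used[] flag array by whole-circle sweeps: each pass scans the sorted list of still-free positions once, picking every position the step-3 threshold reaches during that pass and carrying skipped positions into the next pass, so there is no per-element search at all.
import Mathlib
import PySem

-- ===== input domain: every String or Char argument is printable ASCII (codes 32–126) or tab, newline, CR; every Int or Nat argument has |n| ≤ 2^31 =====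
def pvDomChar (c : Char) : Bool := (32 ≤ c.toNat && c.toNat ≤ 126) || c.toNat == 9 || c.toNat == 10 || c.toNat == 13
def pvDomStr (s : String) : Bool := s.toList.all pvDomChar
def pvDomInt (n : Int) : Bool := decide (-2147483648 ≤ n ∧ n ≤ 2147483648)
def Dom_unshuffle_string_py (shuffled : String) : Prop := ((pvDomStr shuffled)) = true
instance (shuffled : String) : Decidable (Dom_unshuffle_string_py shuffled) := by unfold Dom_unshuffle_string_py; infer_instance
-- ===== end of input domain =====

-- B replaces A's per-pick circular probe over a used[] array by whole-circle sweeps over the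
-- shrinking sorted list of free positions, picking every position the step-3 threshold reaches
-- in one sweep (objective: alternative algorithm; not measured faster).

-- ===== PORT A =====
-- the `while used[index]` scan; fuel n suffices whenever an unused slot exists,
-- fuel exhaustion (none) corresponds to the (unreachable) infinite loop
def pvScanA (n : Nat) (used : Array Bool) : Nat → Nat → Option Nat
  | _, 0 => none
  | idx, f+1 => if used[idx]! then pvScanA n used ((idx+1) % n) f else some idx

-- the `for i in range(length)` loop; acc holds `original` reversed
def pvLoopA (cs : List Char) (n : Nat) : Nat → Array Bool → Nat → List Char → Option (List Char)
  | 0, _, _, acc => some acc.reverse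
  | i+1, used, idx, acc =>
    match pvScanA n used idx n with
    | none => none
    | some p =>
      match cs[p]? with
      | none => none
      | some c => pvLoopA cs n i (used.setIfInBounds p true) ((p+3) % n) (c :: acc)

def unshuffle_string_py (shuffled : String) : Option String :=
  (pvLoopA shuffled.toList shuffled.toList.length shuffled.toList.length
      (Array.replicate shuffled.toList.length false) 0 []).map String.ofList

-- ===== PORT B =====
-- Source B's inner `while i < len(free)` sweep: picks every free position the step-3 threshold
-- reaches, appends the skipped ones to `rest`; on a wrap (x+3 >= n) the rest of the sweep
-- is carried over and the sweep ends
def pvPassB (cs : List Char) (n : Nat) : List Nat → Nat → List Nat → List Char → Option (List Nat × Nat × List Char)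
  | [], t, rest, out => some (rest, t, out)
  | x :: tl, t, rest, out =>
    if t ≤ x then
      match cs[x]? with
      | none => none
      | some c =>
        if n ≤ x + 3 then some (rest ++ tl, (x+3) % n, out ++ [c])
        else pvPassB cs n tl (x+3) rest (out ++ [c])
    else pvPassB cs n tl t (rest ++ [x]) out

-- Source B's outer `while free` loop (with the free[-1] < t wrap pre-check); each pass picks at
-- least one position, so fuel n+1 suffices; fuel-out (none) is unreachable
def pvOuterB (cs : List Char) (n : Nat) : Nat → List Nat → Nat → List Char → Option (List Char)
  | 0, free, _, out => if free.isEmpty then some out else none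
  | _+1, [], _, out => some out
  | f+1, x :: tl, t, out =>
    let t1 := if (x :: tl).getLast (List.cons_ne_nil x tl) < t then 0 else t
    match pvPassB cs n (x :: tl) t1 [] out with
    | none => none
    | some (rest, t', out') => pvOuterB cs n f rest t' out'

def unshuffle_string_py_alt (shuffled : String) : Option String :=
  (pvOuterB shuffled.toList shuffled.toList.length (shuffled.toList.length + 1)
      (List.range shuffled.toList.length) 0 []).map String.ofList

-- ===== PRECONDITION & SPEC =====
def Spec_unshuffle_string_py (shuffled : String) (out : Option String) : Prop := out = unshuffle_string_py_alt shuffled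
instance (shuffled : String) (out : Option String) : Decidable (Spec_unshuffle_string_py shuffled out) := by unfold Spec_unshuffle_string_py; infer_instance

-- ===== CLAIM (what is proved, stated in full; the proofs are below) =====
def Claim_equal_unshuffle_string_py : Prop := ∀ (shuffled : String), Dom_unshuffle_string_py shuffled → Spec_unshuffle_string_py shuffled (unshuffle_string_py shuffled)

-- ===== LEMMAS AND PROOFS =====

-- the common intermediate spec: n times, pick the first free position ≥ t (wrapping to the
-- smallest free position), erase it, step the threshold by 3
def pvSel (cs : List Char) (n : Nat) : Nat → List Nat → Nat → List Char → Option (List Char)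
  | 0, _, _, out => some out
  | i+1, free, t, out =>
    match (free.find? (fun y => t ≤ y)).or free.head? with
    | none => none
    | some p =>
      match cs[p]? with
      | none => none
      | some c => pvSel cs n i (free.erase p) ((p+3) % n) (out ++ [c])

-- the unused-position list, expressed from A's state
def pvFree (n : Nat) (used : Array Bool) : List Nat :=
  (List.range n).filter (fun j => !used[j]!)

-- A's circular scan = find? over the rotated index sequence
theorem pvScanA_eq_find (n : Nat) (used : Array Bool) (f : Nat) :
    ∀ idx, idx < n →
      pvScanA n used idx f
        = ((List.range f).map (fun t => (idx+t) % n)).find? (fun j => !used[j]!) := by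
  induction f with
  | zero => intro idx _; simp [pvScanA]
  | succ f ih =>
    intro idx hidx
    have hpos : 0 < n := by omega
    rw [List.range_succ_eq_map, List.map_cons, List.map_map]
    have hlist : (List.range f).map ((fun t => (idx + t) % n) ∘ Nat.succ)
        = (List.range f).map (fun t => ((idx+1) % n + t) % n) := by
      apply List.map_congr_left
      intro t _
      show (idx + (t+1)) % n = ((idx+1) % n + t) % n
      have h1 : ((idx+1) % n + t) % n = ((idx+1) + t) % n :=
        (Nat.mod_modEq (idx+1) n).add_right t
      rw [h1]
      congr 1
      omega
    rw [hlist]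
    have h0 : (idx + 0) % n = idx := by rw [Nat.add_zero, Nat.mod_eq_of_lt hidx]
    rw [h0]
    by_cases hu : used[idx]! = true
    · rw [List.find?_cons_of_neg (by simp [hu])]
      simp only [pvScanA, hu, if_true]
      exact ih _ (Nat.mod_lt _ hpos)
    · rw [List.find?_cons_of_pos (by simp [hu])]
      simp [pvScanA, hu]

-- rotated index sequence = tail range ++ head range
theorem pvRot (n idx : Nat) (hidx : idx < n) :
    (List.range n).map (fun t => (idx+t) % n)
      = List.range' idx (n-idx) ++ List.range idx := by
  have hsplit : List.range n = List.range (n-idx) ++ List.range' (n-idx) idx := by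
    rw [List.range_eq_range', List.range_eq_range']
    have h := @List.range'_append 0 (n-idx) idx 1
    simp at h
    have h2 : n - idx + idx = n := by omega
    rw [h2] at h
    exact h.symm
  rw [hsplit, List.map_append]
  congr 1
  · rw [List.range'_eq_map_range]
    apply List.map_congr_left
    intro t ht
    rw [List.mem_range] at ht
    exact Nat.mod_eq_of_lt (by omega)
  · rw [List.range'_eq_map_range, List.map_map]
    conv_rhs => rw [← List.map_id (List.range idx)]
    apply List.map_congr_left
    intro t ht
    rw [List.mem_range] at ht
    show (idx + (n - idx + t)) % n = t
    have h3 : idx + (n - idx + t) = n + t := by omega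
    rw [h3, Nat.add_mod_left]
    exact Nat.mod_eq_of_lt (by omega)

-- find? under a pointwise-equal predicate
theorem pvFind?_congr {α : Type} (q q' : α → Bool) :
    ∀ (l : List α), (∀ a ∈ l, q a = q' a) → l.find? q = l.find? q' := by
  intro l
  induction l with
  | nil => intro _; rfl
  | cons a t ih =>
    intro h
    rw [List.find?_cons, List.find?_cons, h a (List.mem_cons_self)]
    split
    · rfl
    · exact ih (fun a ha => h a (List.mem_cons_of_mem _ ha))

-- A's scan with fuel n, characterised through the free list
theorem pvScanA_char (n : Nat) (used : Array Bool) (idx : Nat) (hidx : idx < n) :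
    pvScanA n used idx n
      = ((pvFree n used).find? (fun x => idx ≤ x)).or (pvFree n used).head? := by
  rw [pvScanA_eq_find n used n idx hidx, pvRot n idx hidx, List.find?_append]
  have hsplit : List.range n = List.range idx ++ List.range' idx (n-idx) := by
    rw [List.range_eq_range', List.range_eq_range']
    have h := @List.range'_append 0 idx (n-idx) 1
    simp at h
    have h2 : idx + (n - idx) = n := by omega
    rw [h2] at h
    exact h.symm
  have hfind1 : (pvFree n used).find? (fun x => idx ≤ x)
      = (List.range' idx (n-idx)).find? (fun j => !used[j]!) := by
    rw [pvFree, List.find?_filter, hsplit, List.find?_append]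
    have h1 : (List.range idx).find?
        (fun a => decide ((!used[a]!) = true ∧ decide (idx ≤ a) = true)) = none := by
      rw [List.find?_eq_none]
      intro x hx
      rw [List.mem_range] at hx
      simp only [decide_eq_true_eq, not_and]
      intro _
      omega
    rw [h1, Option.none_or]
    apply pvFind?_congr
    intro a ha
    rw [List.mem_range'_1] at ha
    simp [ha.1]
  rw [hfind1]
  cases hc : (List.range' idx (n-idx)).find? (fun j => !used[j]!) with
  | some v => rfl
  | none =>
    simp only [Option.none_or]
    rw [pvFree, List.head?_filter, hsplit, List.find?_append, hc]
    simp

-- marking p used = erasing p from the free list (on any Nodup index list)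
theorem pvFilter_set (used : Array Bool) (p : Nat) (hp : p < used.size) :
    ∀ (l : List Nat), l.Nodup →
      l.filter (fun j => !(used.setIfInBounds p true)[j]!)
        = (l.filter (fun j => !used[j]!)).erase p := by
  have hne' : ∀ j, j ≠ p → (used.setIfInBounds p true)[j]! = used[j]! := by
    intro j hj
    rw [Array.getElem!_eq_getD, Array.getElem!_eq_getD, Array.getD_eq_getD_getElem?,
      Array.getD_eq_getD_getElem?, Array.getElem?_setIfInBounds, if_neg (fun h => hj h.symm)]
  intro l
  induction l with
  | nil => intro _; rfl
  | cons a t ih =>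
    intro hnd
    rw [List.nodup_cons] at hnd
    by_cases hap : a = p
    · subst hap
      have hpa : (used.setIfInBounds a true)[a]! = true := by
        rw [Array.getElem!_eq_getD, Array.getD_eq_getD_getElem?, Array.getElem?_setIfInBounds,
          if_pos rfl, if_pos hp]
        rfl
      have ht : t.filter (fun j => !(used.setIfInBounds a true)[j]!)
          = t.filter (fun j => !used[j]!) :=
        List.filter_congr (fun j hj => by rw [hne' j (fun h => hnd.1 (h ▸ hj))])
      rw [List.filter_cons, List.filter_cons, hpa, ht]
      by_cases hu : (!used[a]!) = true
      · rw [if_pos hu]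
        simp only [Bool.not_true, Bool.false_eq_true, if_false, List.erase_cons_head]
      · rw [if_neg hu]
        simp only [Bool.not_true, Bool.false_eq_true, if_false]
        have : a ∉ t.filter (fun j => !used[j]!) := fun h => hnd.1 (List.mem_of_mem_filter h)
        rw [List.erase_of_not_mem this]
    · rw [List.filter_cons, List.filter_cons, hne' a hap, ih hnd.2]
      by_cases hu : (!used[a]!) = true
      · rw [if_pos hu, if_pos hu, List.erase_cons_tail (by simpa using hap)]
      · rw [if_neg hu, if_neg hu]

theorem pvFree_set (n : Nat) (used : Array Bool) (p : Nat) (hp : p < n) (hsz : used.size = n) :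
    pvFree n (used.setIfInBounds p true) = (pvFree n used).erase p := by
  unfold pvFree
  exact pvFilter_set used p (by omega) (List.range n) List.nodup_range

theorem pvFree_replicate (n : Nat) : pvFree n (Array.replicate n false) = List.range n := by
  unfold pvFree
  rw [List.filter_eq_self]
  intro a ha
  rw [List.mem_range] at ha
  have h : (Array.replicate n false)[a]! = false := by
    rw [Array.getElem!_eq_getD, Array.getD_eq_getD_getElem?,
      Array.getElem?_eq_getElem (by simpa using ha)]
    simp
  rw [h]
  rfl

-- A's loop = the intermediate spec
theorem pvLoopA_eq_sel (cs : List Char) (n : Nat) :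
    ∀ i used idx acc (F : List Nat), used.size = n → idx < n → F = pvFree n used →
      pvLoopA cs n i used idx acc = pvSel cs n i F idx acc.reverse := by
  intro i
  induction i with
  | zero => intro _ _ _ _ _ _ _; rfl
  | succ i ih =>
    intro used idx acc F hsz hidx hF
    have hpos : 0 < n := by omega
    show (match pvScanA n used idx n with
      | none => none
      | some p =>
        match cs[p]? with
        | none => none
        | some c => pvLoopA cs n i (used.setIfInBounds p true) ((p+3) % n) (c :: acc))
      = pvSel cs n (i+1) F idx acc.reverse
    rw [pvScanA_char n used idx hidx, ← hF]
    cases hsel : (F.find? (fun y => idx ≤ y)).or F.head? with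
    | none => simp only [pvSel, hsel]
    | some p =>
      have hpF : p ∈ F := by
        cases hf : F.find? (fun y => idx ≤ y) with
        | some q =>
          rw [hf, Option.some_or] at hsel
          cases hsel
          exact List.mem_of_find?_eq_some hf
        | none =>
          rw [hf, Option.none_or] at hsel
          cases F with
          | nil => simp at hsel
          | cons a l =>
            simp only [List.head?_cons, Option.some.injEq] at hsel
            subst hsel
            exact List.mem_cons_self
      have hpn : p < n := by
        have := hpF
        rw [hF, pvFree, List.mem_filter, List.mem_range] at this
        exact this.1
      cases hc : cs[p]? with
      | none => simp only [pvSel, hsel, hc]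
      | some c =>
        simp only [pvSel, hsel, hc]
        have hrec := ih (used.setIfInBounds p true) ((p+3) % n) (c :: acc) (F.erase p)
          (by rw [Array.size_setIfInBounds]; exact hsz) (Nat.mod_lt _ hpos)
          (by rw [hF, ← pvFree_set n used p hpn hsz])
        rw [hrec]
        simp

-- one pvSel step picks the first free position ≥ t, when every earlier one is < t
theorem pvSel_step (cs : List Char) (n : Nat) (rest tl : List Nat) (x t i : Nat)
    (out : List Char) (c : Char)
    (hrest : ∀ y ∈ rest, y < t) (hx : t ≤ x) (hc : cs[x]? = some c) :
    pvSel cs n (i+1) (rest ++ x :: tl) t out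
      = pvSel cs n i (rest ++ tl) ((x+3) % n) (out ++ [c]) := by
  have hfind : (rest ++ x :: tl).find? (fun y => t ≤ y) = some x := by
    rw [List.find?_append]
    have h1 : rest.find? (fun y => t ≤ y) = none := by
      rw [List.find?_eq_none]
      intro y hy
      simpa using Nat.not_le.mpr (hrest y hy)
    rw [h1, Option.none_or, List.find?_cons_of_pos (by simpa using hx)]
  have hxnotin : x ∉ rest := fun h => absurd hx (Nat.not_le.mpr (hrest x h))
  have herase : (rest ++ x :: tl).erase x = rest ++ tl := by
    rw [List.erase_append_right _ hxnotin, List.erase_cons_head]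
  simp only [pvSel, hfind, Option.some_or, hc, herase]

-- a threshold beyond every free position acts like threshold 0 (the circular wrap)
theorem pvSel_zero_t (cs : List Char) (n i : Nat) (x : Nat) (tl : List Nat) (t : Nat)
    (out : List Char) (hall : ∀ y ∈ x :: tl, y < t) :
    pvSel cs n i (x :: tl) t out = pvSel cs n i (x :: tl) 0 out := by
  cases i with
  | zero => rfl
  | succ j =>
    have hfnone : (x :: tl).find? (fun y => t ≤ y) = none := by
      rw [List.find?_eq_none]
      intro y hy
      simpa using Nat.not_le.mpr (hall y hy)
    have hf0 : (x :: tl).find? (fun y => (0:Nat) ≤ y) = some x :=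
      List.find?_cons_of_pos (by simp)
    simp only [pvSel, hfnone, hf0, Option.none_or, Option.some_or, List.head?_cons]

-- one B pass = k steps of the intermediate spec
theorem pvPassB_sel (cs : List Char) (n : Nat) (hn : n = cs.length) :
    ∀ (rem rest : List Nat) (t : Nat) (out : List Char),
      (rest ++ rem).Pairwise (· < ·) →
      (∀ x ∈ rest ++ rem, x < n) →
      (∀ x ∈ rest, x < t) →
      ∃ k free1 t1 out1,
        pvPassB cs n rem t rest out = some (free1, t1, out1) ∧
        free1.Sublist (rest ++ rem) ∧
        free1.length + k = rest.length + rem.length ∧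
        ((∃ x ∈ rem, t ≤ x) → 1 ≤ k) ∧
        ∀ j, pvSel cs n (k + j) (rest ++ rem) t out = pvSel cs n j free1 t1 out1 := by
  intro rem
  induction rem with
  | nil =>
    intro rest t out _ _ _
    refine ⟨0, rest, t, out, rfl, by simp, by simp, by simp, fun j => by simp⟩
  | cons x tl ih =>
    intro rest t out hsort hlt hrt
    by_cases hx : t ≤ x
    · have hxn : x < n := hlt x (by simp)
      have hxcs : x < cs.length := hn ▸ hxn
      have hcx : cs[x]? = some (cs[x]'hxcs) := List.getElem?_eq_getElem hxcs
      by_cases hw : n ≤ x + 3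
      · refine ⟨1, rest ++ tl, (x+3) % n, out ++ [cs[x]'hxcs], ?_, ?_, by simp; omega,
          fun _ => le_refl 1, ?_⟩
        · simp only [pvPassB, if_pos hx, hcx, if_pos hw]
        · exact List.Sublist.append_left (List.sublist_cons_self x tl) rest
        · intro j
          rw [Nat.add_comm 1 j]
          exact pvSel_step cs n rest tl x t j out _ hrt hx hcx
      · have h3 : x + 3 < n := Nat.lt_of_not_le hw
        have hsort' : (rest ++ tl).Pairwise (· < ·) :=
          hsort.sublist (List.Sublist.append_left (List.sublist_cons_self x tl) rest)
        have hlt' : ∀ y ∈ rest ++ tl, y < n := fun y hy =>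
          hlt y ((List.Sublist.append_left (List.sublist_cons_self x tl) rest).mem hy)
        have hrt' : ∀ y ∈ rest, y < x + 3 := fun y hy =>
          lt_of_lt_of_le (hrt y hy) (le_trans hx (by omega))
        obtain ⟨k, f1, t1, o1, heq, hsub, hlen, _, hchain⟩ :=
          ih rest (x+3) (out ++ [cs[x]'hxcs]) hsort' hlt' hrt'
        refine ⟨k+1, f1, t1, o1, ?_, ?_, by simp at hlen ⊢; omega,
          fun _ => Nat.le_add_left 1 k, ?_⟩
        · simp only [pvPassB, if_pos hx, hcx, if_neg hw]
          exact heq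
        · exact hsub.trans (List.Sublist.append_left (List.sublist_cons_self x tl) rest)
        · intro j
          rw [show k+1+j = (k+j)+1 by omega,
            pvSel_step cs n rest tl x t (k+j) out _ hrt hx hcx,
            show (x+3) % n = x+3 from Nat.mod_eq_of_lt h3]
          exact hchain j
    · have hxt : x < t := Nat.lt_of_not_le hx
      have hassoc : (rest ++ [x]) ++ tl = rest ++ x :: tl := by simp
      have hsort' : ((rest ++ [x]) ++ tl).Pairwise (· < ·) := by rw [hassoc]; exact hsort
      have hlt' : ∀ y ∈ (rest ++ [x]) ++ tl, y < n := by rw [hassoc]; exact hlt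
      have hrt' : ∀ y ∈ rest ++ [x], y < t := by
        intro y hy
        rcases List.mem_append.mp hy with h | h
        · exact hrt y h
        · simp at h; omega
      obtain ⟨k, f1, t1, o1, heq, hsub, hlen, hk1, hchain⟩ :=
        ih (rest ++ [x]) t out hsort' hlt' hrt'
      refine ⟨k, f1, t1, o1, ?_, by rw [← hassoc]; exact hsub,
        by simp at hlen ⊢; omega, ?_, ?_⟩
      · simp only [pvPassB, if_neg hx]
        exact heq
      · rintro ⟨y, hy, hty⟩
        rcases List.mem_cons.mp hy with rfl | h
        · exact absurd hty hx
        · exact hk1 ⟨y, h, hty⟩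
      · intro j
        rw [← hassoc]
        exact hchain j

-- every element of a strictly sorted nonempty list is ≤ its last element
theorem pvAllLeLast : ∀ (l : List Nat) (h : l ≠ []), l.Pairwise (· < ·) →
    ∀ y ∈ l, y ≤ l.getLast h := by
  intro l
  induction l with
  | nil => intro h; exact absurd rfl h
  | cons a tl ih =>
    intro _ hsort y hy
    cases tl with
    | nil => simp at hy; simp [hy, List.getLast]
    | cons b tl2 =>
      rw [List.getLast_cons (List.cons_ne_nil b tl2)]
      rcases List.mem_cons.mp hy with rfl | h
      · have hlast : (b :: tl2).getLast (List.cons_ne_nil b tl2) ∈ b :: tl2 :=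
          List.getLast_mem _
        have := (List.pairwise_cons.mp hsort).1 _ hlast
        omega
      · exact ih (List.cons_ne_nil b tl2) (List.pairwise_cons.mp hsort).2 y h

-- B's outer loop = the intermediate spec
theorem pvOuterB_sel (cs : List Char) (n : Nat) (hn : n = cs.length) :
    ∀ fuel (free : List Nat) (t : Nat) (out : List Char),
      free.Pairwise (· < ·) → (∀ x ∈ free, x < n) → free.length < fuel →
      pvOuterB cs n fuel free t out = pvSel cs n free.length free t out := by
  intro fuel
  induction fuel with
  | zero => intro free t out _ _ h; omega
  | succ f ih =>
    intro free t out hsort hlt hflen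
    cases free with
    | nil => rfl
    | cons x tl =>
      have hne : x :: tl ≠ [] := List.cons_ne_nil x tl
      set t1 := if (x :: tl).getLast hne < t then 0 else t with ht1
      have hstep1 : pvSel cs n (x :: tl).length (x :: tl) t out
          = pvSel cs n (x :: tl).length (x :: tl) t1 out := by
        rw [ht1]
        split
        · next hlast =>
          exact pvSel_zero_t cs n _ x tl t out
            (fun y hy => lt_of_le_of_lt (pvAllLeLast _ hne hsort y hy) hlast)
        · rfl
      obtain ⟨k, f1, t', o1, heq, hsub, hlen, hk1, hchain⟩ :=
        pvPassB_sel cs n hn (x :: tl) [] t1 out (by simpa using hsort)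
          (by simpa using hlt) (by simp)
      simp only [List.nil_append] at heq hsub hlen hchain
      have hk : 1 ≤ k := by
        apply hk1
        rw [ht1]
        split
        · exact ⟨x, List.mem_cons_self, Nat.zero_le x⟩
        · next hlast =>
          exact ⟨(x :: tl).getLast hne, List.getLast_mem hne, Nat.le_of_not_lt hlast⟩
      have hlen' : f1.length + k = (x :: tl).length := by simpa using hlen
      have hf1len : f1.length = (x :: tl).length - k := by omega
      show (match pvPassB cs n (x :: tl) t1 [] out with
        | none => none
        | some (rest, t', out') => pvOuterB cs n f rest t' out')
        = pvSel cs n (x :: tl).length (x :: tl) t out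
      rw [heq, hstep1]
      have := hchain ((x :: tl).length - k)
      rw [show k + ((x :: tl).length - k) = (x :: tl).length by omega] at this
      rw [this, ← hf1len]
      show pvOuterB cs n f f1 t' o1 = pvSel cs n f1.length f1 t' o1
      exact ih f1 t' o1 (hsort.sublist hsub) (fun y hy => hlt y (hsub.mem hy)) (by omega)

theorem unshuffle_string_py_eq (shuffled : String) :
    unshuffle_string_py shuffled = unshuffle_string_py_alt shuffled := by
  unfold unshuffle_string_py unshuffle_string_py_alt
  rcases hn : shuffled.toList.length with _ | m
  · rfl
  · congr 1
    have hA : pvLoopA shuffled.toList (m+1) (m+1) (Array.replicate (m+1) false) 0 []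
        = pvSel shuffled.toList (m+1) (m+1) (List.range (m+1)) 0 [] := by
      have := pvLoopA_eq_sel shuffled.toList (m+1) (m+1)
        (Array.replicate (m+1) false) 0 [] (List.range (m+1))
        (by simp) (by omega) (pvFree_replicate (m+1)).symm
      simpa using this
    have hB : pvOuterB shuffled.toList (m+1) (m+2) (List.range (m+1)) 0 []
        = pvSel shuffled.toList (m+1) (m+1) (List.range (m+1)) 0 [] := by
      have := pvOuterB_sel shuffled.toList (m+1) hn.symm (m+2) (List.range (m+1)) 0 []
        List.pairwise_lt_range (fun x hx => List.mem_range.mp hx) (by simp)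
      simpa using this
    rw [hA, hB]

-- ===== VERDICT (by name: the statement is the Claim_ definition above) =====
theorem unshuffle_string_py_spec : Claim_equal_unshuffle_string_py := by
  intro shuffled _
  unfold Spec_unshuffle_string_py
  exact unshuffle_string_py_eq shuffled
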